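-- pv_equiv track=rewrite | github.com/slongfield/StereoCensus | verilog/census/argmin_gen.py | generate_argmin
-- ===== SOURCE A (Python) =====
-- _HEADER = """
-- `ifndef CENSUS_ARGMIN_{0}_V_
-- `define CENSUS_ARGMIN_{0}_V_
--
-- module argmin_{0}#(
--     parameter WIDTH=1
--   ) (
--     input wire clk,
--     input wire rst,
--
--     input wire [WIDTH*{0}-1:0] inp,
--
--     output wire [WIDTH-1:0] outp,
--     output wire [$clog2({0})-1:0] outp_addr
--   );
--
--   localparam ADDR_WIDTH = $clog2({0});
-- """
--
-- _FOOTER = """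
-- endmodule
--
-- `endif // CENSUS_ARGMIN_V_
-- """
--
-- _STAGE = """
--   argmin_helper#(.WIDTH(WIDTH), .ADDR_WIDTH(ADDR_WIDTH), .NUM_INP({num_inp}),
--                  .NUM_OUTP({num_outp}), .STAGE({stage}))
--                 ah_{stage}(clk, rst, {inp}, {inp_addr}, {outp}, {outp_addr});
-- """
--
-- def generate_argmin(num_inputs):
--     """generate_argmin generates an argmin function
--
--     Args:
--
--     Returns:
--       argmin (string): verilog that computes the argmin function
--     """
--     lines = []
--     lines.append(_HEADER.format(num_inputs))
--
--     # Pretend the inputs were the outputs from some imaginary previous stage.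
--     prev_output = "inp"
--     prev_output_addr = "0"
--     stage = 0
--     input_size = num_inputs
--
--     while (input_size > 1):
--         output_size = input_size // 2 + input_size % 2
--
--         outp_name = "data_{}".format(stage)
--         outp_addr = "addr_{}".format(stage)
--
--         # Create some new output ports
--         lines.append("  wire [WIDTH*{}-1:0]      {};".format(output_size,
--                                                              outp_name))
--         lines.append("  wire [ADDR_WIDTH*{}-1:0] {};".format(output_size,
--                                                              outp_addr))
--         lines.append(_STAGE.format(num_inp=input_size, num_outp=output_size,
--                                    stage=stage, inp=prev_output, inp_addr=prev_output_addr,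
--                                    outp=outp_name, outp_addr=outp_addr))
--
--         stage += 1
--         input_size = output_size
--         prev_output = outp_name
--         prev_output_addr = outp_addr
--
--     # Set up the outputs
--     lines.append("  assign outp      = {};".format(prev_output))
--     lines.append("  assign outp_addr = {};".format(prev_output_addr))
--
--     lines.append(_FOOTER)
--     return "\n".join(lines)
-- ===== SOURCE B (Python) =====
-- _HEADER = """
-- `ifndef CENSUS_ARGMIN_{0}_V_
-- `define CENSUS_ARGMIN_{0}_V_
--
-- module argmin_{0}#(
--     parameter WIDTH=1
--   ) (
--     input wire clk,
--     input wire rst,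
--
--     input wire [WIDTH*{0}-1:0] inp,
--
--     output wire [WIDTH-1:0] outp,
--     output wire [$clog2({0})-1:0] outp_addr
--   );
--
--   localparam ADDR_WIDTH = $clog2({0});
-- """
--
-- _FOOTER = """
-- endmodule
--
-- `endif // CENSUS_ARGMIN_V_
-- """
--
-- _STAGE = """
--   argmin_helper#(.WIDTH(WIDTH), .ADDR_WIDTH(ADDR_WIDTH), .NUM_INP({num_inp}),
--                  .NUM_OUTP({num_outp}), .STAGE({stage}))
--                 ah_{stage}(clk, rst, {inp}, {inp_addr}, {outp}, {outp_addr});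
-- """
--
--
-- def generate_argmin(num_inputs):
--     """Schedule-first rewrite: build the (in_size, out_size) halving schedule,
--     then render all text from the schedule by index."""
--     # 1. the halving schedule
--     schedule = []
--     size = num_inputs
--     while size > 1:
--         out = size // 2 + size % 2
--         schedule.append((size, out))
--         size = out
--
--     # 2. render
--     lines = [_HEADER.format(num_inputs)]
--     for i, (in_sz, out_sz) in enumerate(schedule):
--         src = "inp" if i == 0 else "data_{}".format(i - 1)
--         src_addr = "0" if i == 0 else "addr_{}".format(i - 1)
--         lines.append("  wire [WIDTH*{}-1:0]      data_{};".format(out_sz, i))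
--         lines.append("  wire [ADDR_WIDTH*{}-1:0] addr_{};".format(out_sz, i))
--         lines.append(_STAGE.format(num_inp=in_sz, num_outp=out_sz, stage=i,
--                                    inp=src, inp_addr=src_addr,
--                                    outp="data_{}".format(i),
--                                    outp_addr="addr_{}".format(i)))
--
--     last = "data_{}".format(len(schedule) - 1) if schedule else "inp"
--     last_addr = "addr_{}".format(len(schedule) - 1) if schedule else "0"
--     lines.append("  assign outp      = {};".format(last))
--     lines.append("  assign outp_addr = {};".format(last_addr))
--     lines.append(_FOOTER)
--     return "\n".join(lines)
-- ===== Notes on version B (the rewrite author's own statement) =====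
-- stated objective: alternative
-- what changed: B splits A's single stateful while-loop into two phases: it first computes the halving schedule as a list of (input_size, output_size) pairs, then renders all wire/stage lines and the final assigns purely from schedule indices (src names derived from i instead of threaded prev_output state).
import Mathlib
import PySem

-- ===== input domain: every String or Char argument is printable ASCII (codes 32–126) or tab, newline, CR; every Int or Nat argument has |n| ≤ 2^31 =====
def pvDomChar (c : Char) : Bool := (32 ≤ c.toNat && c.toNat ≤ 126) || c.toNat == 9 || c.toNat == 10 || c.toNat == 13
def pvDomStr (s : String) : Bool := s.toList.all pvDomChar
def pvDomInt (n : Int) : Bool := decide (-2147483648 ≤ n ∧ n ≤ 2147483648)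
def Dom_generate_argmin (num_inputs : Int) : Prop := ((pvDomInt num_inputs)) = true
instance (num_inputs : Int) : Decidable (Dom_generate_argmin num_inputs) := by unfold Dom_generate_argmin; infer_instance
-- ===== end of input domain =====

-- B builds the (input_size, output_size) halving schedule first, then renders every
-- line from the schedule by index (objective: alternative decomposition, same cost).

-- shared template helpers (the Python module constants _HEADER/_FOOTER/_STAGE)
def pvHeader (n : Int) : String :=
  "\n`ifndef CENSUS_ARGMIN_" ++ PySem.Int.toStr n ++ "_V_\n`define CENSUS_ARGMIN_" ++ PySem.Int.toStr n ++
  "_V_\n\nmodule argmin_" ++ PySem.Int.toStr n ++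
  "#(\n    parameter WIDTH=1\n  ) (\n    input wire clk,\n    input wire rst,\n\n    input wire [WIDTH*" ++
  PySem.Int.toStr n ++
  "-1:0] inp,\n\n    output wire [WIDTH-1:0] outp,\n    output wire [$clog2(" ++ PySem.Int.toStr n ++
  ")-1:0] outp_addr\n  );\n\n  localparam ADDR_WIDTH = $clog2(" ++ PySem.Int.toStr n ++ ");\n"

def pvFooter : String := "\nendmodule\n\n`endif // CENSUS_ARGMIN_V_\n"

def pvStage (num_inp num_outp stage : Int) (inp inp_addr outp outp_addr : String) : String :=
  "\n  argmin_helper#(.WIDTH(WIDTH), .ADDR_WIDTH(ADDR_WIDTH), .NUM_INP(" ++ PySem.Int.toStr num_inp ++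
  "),\n                 .NUM_OUTP(" ++ PySem.Int.toStr num_outp ++ "), .STAGE(" ++ PySem.Int.toStr stage ++
  "))\n                ah_" ++ PySem.Int.toStr stage ++ "(clk, rst, " ++ inp ++ ", " ++ inp_addr ++ ", " ++
  outp ++ ", " ++ outp_addr ++ ");\n"

def pvWire1 (os : Int) (name : String) : String :=
  "  wire [WIDTH*" ++ PySem.Int.toStr os ++ "-1:0]      " ++ name ++ ";"

def pvWire2 (os : Int) (name : String) : String :=
  "  wire [ADDR_WIDTH*" ++ PySem.Int.toStr os ++ "-1:0] " ++ name ++ ";"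

-- termination fact both loops cite: one halving step shrinks a size > 1
lemma pvHalf_lt {s : Int} (h : 1 < s) :
    (PySem.Int.floordiv s 2 + PySem.Int.mod s 2).toNat < s.toNat := by
  rw [PySem.Int.floordiv_eq_ediv_of_pos (by omega), PySem.Int.mod_eq_emod_of_pos (by omega)]
  omega

-- ===== PORT A =====
-- A's while-loop: state (input_size, stage, prev_output, prev_output_addr, lines)
def pvALoop (input_size stage : Int) (prev prevAddr : String) (lines : List String) :
    List String × String × String :=
  if h : 1 < input_size then
    let output_size := PySem.Int.floordiv input_size 2 + PySem.Int.mod input_size 2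
    let outp_name := "data_" ++ PySem.Int.toStr stage
    let outp_addr := "addr_" ++ PySem.Int.toStr stage
    pvALoop output_size (stage + 1) outp_name outp_addr
      (lines ++ [pvWire1 output_size outp_name, pvWire2 output_size outp_addr,
                 pvStage input_size output_size stage prev prevAddr outp_name outp_addr])
  else (lines, prev, prevAddr)
termination_by input_size.toNat
decreasing_by exact pvHalf_lt h

def generate_argmin (num_inputs : Int) : String :=
  let r := pvALoop num_inputs 0 "inp" "0" [pvHeader num_inputs]
  PySem.Str.join "\n"
    (r.1 ++ ["  assign outp      = " ++ r.2.1 ++ ";",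
             "  assign outp_addr = " ++ r.2.2 ++ ";", pvFooter])

-- ===== PORT B =====
-- step 1: the halving schedule [(input_size, output_size), …]
def pvSched (size : Int) : List (Int × Int) :=
  if h : 1 < size then
    let out := PySem.Int.floordiv size 2 + PySem.Int.mod size 2
    (size, out) :: pvSched out
  else []
termination_by size.toNat
decreasing_by exact pvHalf_lt h

-- step 2: render the stage lines from the schedule by index
def pvEmit : List (Int × Int) → Int → List String
  | [], _ => []
  | (in_sz, out_sz) :: rest, i =>
    let src := if i == 0 then "inp" else "data_" ++ PySem.Int.toStr (i - 1)
    let srcAddr := if i == 0 then "0" else "addr_" ++ PySem.Int.toStr (i - 1)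
    pvWire1 out_sz ("data_" ++ PySem.Int.toStr i) ::
    pvWire2 out_sz ("addr_" ++ PySem.Int.toStr i) ::
    pvStage in_sz out_sz i src srcAddr ("data_" ++ PySem.Int.toStr i) ("addr_" ++ PySem.Int.toStr i) ::
    pvEmit rest (i + 1)

def generate_argmin_alt (num_inputs : Int) : String :=
  let sched := pvSched num_inputs
  let last := if sched.isEmpty then "inp"
              else "data_" ++ PySem.Int.toStr ((sched.length : Int) - 1)
  let lastAddr := if sched.isEmpty then "0"
              else "addr_" ++ PySem.Int.toStr ((sched.length : Int) - 1)
  PySem.Str.join "\n"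
    ((pvHeader num_inputs :: pvEmit sched 0) ++
     ["  assign outp      = " ++ last ++ ";",
      "  assign outp_addr = " ++ lastAddr ++ ";", pvFooter])

-- ===== PRECONDITION & SPEC =====
def Spec_generate_argmin (num_inputs : Int) (out : String) : Prop := out = generate_argmin_alt num_inputs
instance (num_inputs : Int) (out : String) : Decidable (Spec_generate_argmin num_inputs out) := by unfold Spec_generate_argmin; infer_instance

-- ===== CLAIM (what is proved, stated in full; the proofs are below) =====
def Claim_equal_generate_argmin : Prop := ∀ (num_inputs : Int), Dom_generate_argmin num_inputs → Spec_generate_argmin num_inputs (generate_argmin num_inputs)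

-- ===== LEMMAS AND PROOFS =====

-- A's loop, started at index i with the name shape B computes from i, produces exactly
-- the schedule-rendered lines and the index-(i+len-1) final names.
lemma pvALoop_eq_emit (s i : Int) (hi : 0 ≤ i) (prev prevAddr : String) (lines : List String)
    (hp : prev = if i == 0 then "inp" else "data_" ++ PySem.Int.toStr (i - 1))
    (hq : prevAddr = if i == 0 then "0" else "addr_" ++ PySem.Int.toStr (i - 1)) :
    pvALoop s i prev prevAddr lines =
      (lines ++ pvEmit (pvSched s) i,
       (if (pvSched s).isEmpty then prev
        else "data_" ++ PySem.Int.toStr (i + ((pvSched s).length : Int) - 1)),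
       (if (pvSched s).isEmpty then prevAddr
        else "addr_" ++ PySem.Int.toStr (i + ((pvSched s).length : Int) - 1))) := by
  rw [pvALoop, pvSched]
  by_cases h : 1 < s
  · simp only [dif_pos h]
    set out := PySem.Int.floordiv s 2 + PySem.Int.mod s 2 with hout
    have hrec := pvALoop_eq_emit out (i + 1) (by omega)
      ("data_" ++ PySem.Int.toStr i) ("addr_" ++ PySem.Int.toStr i)
      (lines ++ [pvWire1 out ("data_" ++ PySem.Int.toStr i),
                 pvWire2 out ("addr_" ++ PySem.Int.toStr i),
                 pvStage s out i prev prevAddr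
                   ("data_" ++ PySem.Int.toStr i) ("addr_" ++ PySem.Int.toStr i)])
      (by simp [show ¬ (i + 1 = 0) by omega]) (by simp [show ¬ (i + 1 = 0) by omega])
    rw [hrec]
    refine Prod.ext ?_ (Prod.ext ?_ ?_)
    · simp [pvEmit, hp, hq]
    · by_cases he : (pvSched out).isEmpty
      · simp [List.isEmpty_iff.mp he]
      · simp only [he, List.isEmpty_cons, List.length_cons, Bool.false_eq_true, if_false, Nat.cast_add, Nat.cast_one]
        rw [show i + 1 + ((pvSched out).length : Int) - 1
              = i + (((pvSched out).length : Int) + 1) - 1 by ring]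
    · by_cases he : (pvSched out).isEmpty
      · simp [List.isEmpty_iff.mp he]
      · simp only [he, List.isEmpty_cons, List.length_cons, Bool.false_eq_true, if_false, Nat.cast_add, Nat.cast_one]
        rw [show i + 1 + ((pvSched out).length : Int) - 1
              = i + (((pvSched out).length : Int) + 1) - 1 by ring]
  · simp [dif_neg h, pvEmit]
termination_by s.toNat
decreasing_by exact pvHalf_lt h

-- ===== VERDICT (by name: the statement is the Claim_ definition above) =====
theorem generate_argmin_spec : Claim_equal_generate_argmin := by
  intro n _
  unfold Spec_generate_argmin generate_argmin generate_argmin_alt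
  rw [pvALoop_eq_emit n 0 (by omega) "inp" "0" [pvHeader n] (by simp) (by simp)]
  simp
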